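-- pv_equiv track=rewrite | github.com/MentorMuni/MentorMuniApi | mentormuni-api/app/services/evaluator.py | _build_learning_roadmap
-- ===== SOURCE A (Python) =====
-- from typing import List
--
-- def _build_learning_roadmap(gaps: List[str]) -> List[dict]:
--     """
--     Prioritized roadmap: Critical, High, Medium, Optional.
--     Deterministic logic based on keyword presence.
--     """
--     recommendations = []
--     critical_keywords = {"core", "fundamental", "essential", "basic", "must"}
--     high_keywords = {"design", "system", "architecture", "algorithm", "data"}
--     medium_keywords = {"advanced", "optimization", "scaling", "testing"}
--
--     for i, topic in enumerate(gaps):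
--         topic_lower = topic.lower()
--         if any(kw in topic_lower for kw in critical_keywords):
--             priority = "Critical"
--             why = "Core topic essential for your target role."
--         elif any(kw in topic_lower for kw in high_keywords):
--             priority = "High"
--             why = "Important for technical interviews."
--         elif any(kw in topic_lower for kw in medium_keywords):
--             priority = "Medium"
--             why = "Would strengthen your profile."
--         else:
--             priority = "Optional"
--             why = "Good to know for comprehensive preparation."
--
--         recommendations.append({
--             "priority": priority,
--             "topic": topic,
--             "why": why,
--         })
--
--     # Sort by priority order: Critical > High > Medium > Optional
--     order = {"Critical": 0, "High": 1, "Medium": 2, "Optional": 3}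
--     recommendations.sort(key=lambda r: order.get(r["priority"], 4))
--
--     return recommendations
-- ===== SOURCE B (Python) =====
-- from typing import List
--
-- def _build_learning_roadmap(gaps: List[str]) -> List[dict]:
--     """
--     Bucket version: place each recommendation directly into its priority
--     bucket and concatenate Critical+High+Medium+Optional; no sort needed.
--     """
--     critical_keywords = {"core", "fundamental", "essential", "basic", "must"}
--     high_keywords = {"design", "system", "architecture", "algorithm", "data"}
--     medium_keywords = {"advanced", "optimization", "scaling", "testing"}
--
--     crit, high, med, opt = [], [], [], []
--     for topic in gaps:
--         tl = topic.lower()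
--         if any(kw in tl for kw in critical_keywords):
--             crit.append({"priority": "Critical", "topic": topic,
--                          "why": "Core topic essential for your target role."})
--         elif any(kw in tl for kw in high_keywords):
--             high.append({"priority": "High", "topic": topic,
--                          "why": "Important for technical interviews."})
--         elif any(kw in tl for kw in medium_keywords):
--             med.append({"priority": "Medium", "topic": topic,
--                         "why": "Would strengthen your profile."})
--         else:
--             opt.append({"priority": "Optional", "topic": topic,
--                         "why": "Good to know for comprehensive preparation."})
--     return crit + high + med + opt
-- ===== Notes on version B (the rewrite author's own statement) =====
-- stated objective: alternative
-- what changed: Replaces the append-then-stable-sort-by-priority-key pass with direct placement into four priority buckets that are concatenated in Critical>High>Medium>Optional order (no sort, no key-lookup dict).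
import Mathlib
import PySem

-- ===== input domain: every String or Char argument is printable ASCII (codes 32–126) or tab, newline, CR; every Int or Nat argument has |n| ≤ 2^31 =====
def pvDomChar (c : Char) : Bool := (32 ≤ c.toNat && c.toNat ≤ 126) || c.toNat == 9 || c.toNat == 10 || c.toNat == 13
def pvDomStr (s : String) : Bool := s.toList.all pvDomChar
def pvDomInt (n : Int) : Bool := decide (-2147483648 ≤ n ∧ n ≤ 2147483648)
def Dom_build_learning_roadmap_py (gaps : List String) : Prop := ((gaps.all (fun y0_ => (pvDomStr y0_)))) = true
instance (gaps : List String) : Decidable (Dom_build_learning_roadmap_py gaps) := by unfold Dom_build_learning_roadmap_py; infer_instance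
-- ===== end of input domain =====

-- B replaces A's append-then-stable-sort-by-priority pass with direct placement
-- into four priority buckets concatenated Critical>High>Medium>Optional (alternative decomposition).


-- shared helpers: the classification code (keyword tests, the dict literal) is identical in both Pythons
def rm_hasAny (tl : String) (kws : List String) : Bool := kws.any (fun kw => PySem.Str.isIn kw tl)
def rm_critical_keywords : List String := ["core", "fundamental", "essential", "basic", "must"]
def rm_high_keywords : List String := ["design", "system", "architecture", "algorithm", "data"]
def rm_medium_keywords : List String := ["advanced", "optimization", "scaling", "testing"]
def rm_mk (p t w : String) : List (String × String) := [("priority", p), ("topic", t), ("why", w)]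

-- ===== PORT A =====
-- A's per-iteration body: lower the topic, walk the if/elif chain, build the dict
def rm_entry (topic : String) : List (String × String) :=
  let tl := PySem.Str.lower topic
  if rm_hasAny tl rm_critical_keywords then
    rm_mk "Critical" topic "Core topic essential for your target role."
  else if rm_hasAny tl rm_high_keywords then
    rm_mk "High" topic "Important for technical interviews."
  else if rm_hasAny tl rm_medium_keywords then
    rm_mk "Medium" topic "Would strengthen your profile."
  else
    rm_mk "Optional" topic "Good to know for comprehensive preparation."

-- A's sort key: order.get(r["priority"], 4); r["priority"] is always present, ported as getD with "" default
def rm_key (r : List (String × String)) : Int :=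
  PySem.Dict.getD
    (PySem.Dict.mk [("Critical", (0 : Int)), ("High", 1), ("Medium", 2), ("Optional", 3)])
    (PySem.Dict.getD (PySem.Dict.mk r) "priority" "") 4

def build_learning_roadmap_py (gaps : List String) : List (List (String × String)) :=
  let recommendations := gaps.foldl (fun acc topic => acc ++ [rm_entry topic]) []
  PySem.List.sorted recommendations rm_key

-- ===== PORT B =====
def build_learning_roadmap_py_alt (gaps : List String) : List (List (String × String)) :=
  let s := gaps.foldl
    (fun (s : List (List (String × String)) × List (List (String × String)) ×
              List (List (String × String)) × List (List (String × String))) topic =>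
      let tl := PySem.Str.lower topic
      if rm_hasAny tl rm_critical_keywords then
        (s.1 ++ [rm_mk "Critical" topic "Core topic essential for your target role."], s.2.1, s.2.2.1, s.2.2.2)
      else if rm_hasAny tl rm_high_keywords then
        (s.1, s.2.1 ++ [rm_mk "High" topic "Important for technical interviews."], s.2.2.1, s.2.2.2)
      else if rm_hasAny tl rm_medium_keywords then
        (s.1, s.2.1, s.2.2.1 ++ [rm_mk "Medium" topic "Would strengthen your profile."], s.2.2.2)
      else
        (s.1, s.2.1, s.2.2.1, s.2.2.2 ++ [rm_mk "Optional" topic "Good to know for comprehensive preparation."]))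
    ([], [], [], [])
  s.1 ++ s.2.1 ++ s.2.2.1 ++ s.2.2.2

-- ===== PRECONDITION & SPEC =====
def Spec_build_learning_roadmap_py (gaps : List String) (out : List (List (String × String))) : Prop := out = build_learning_roadmap_py_alt gaps
instance (gaps : List String) (out : List (List (String × String))) : Decidable (Spec_build_learning_roadmap_py gaps out) := by unfold Spec_build_learning_roadmap_py; infer_instance

-- ===== CLAIM (what is proved, stated in full; the proofs are below) =====
def Claim_equal_build_learning_roadmap_py : Prop := ∀ (gaps : List String), Dom_build_learning_roadmap_py gaps → Spec_build_learning_roadmap_py gaps (build_learning_roadmap_py gaps)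

-- ===== LEMMAS AND PROOFS =====

theorem insertBy_append_skip {α : Type} (p : α → α → Bool) (x : α) (l1 l2 : List α)
    (h : ∀ y ∈ l1, p x y = false) :
    PySem.List.insertBy p x (l1 ++ l2) = l1 ++ PySem.List.insertBy p x l2 := by
  induction l1 with
  | nil => simp
  | cons y ys ih =>
    simp only [List.cons_append, PySem.List.insertBy]
    rw [h y (by simp)]
    simp only [if_neg (by simp : ¬ false = true)]
    rw [ih (fun z hz => h z (by simp [hz]))]

theorem insertBy_all_before {α : Type} (p : α → α → Bool) (x : α) (l : List α)
    (h : ∀ y ∈ l, p x y = true) :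
    PySem.List.insertBy p x l = x :: l := by
  cases l with
  | nil => simp [PySem.List.insertBy]
  | cons y ys => simp [PySem.List.insertBy, h y (by simp)]

-- stable sort of a list whose keys lie in {0,1,2,3} is the concatenation of its key-buckets
theorem sorted_bucket {α : Type} (key : α → Int) (xs : List α)
    (h : ∀ x ∈ xs, 0 ≤ key x ∧ key x ≤ 3) :
    PySem.List.sorted xs key =
      xs.filter (fun x => key x == 0) ++ xs.filter (fun x => key x == 1) ++
      xs.filter (fun x => key x == 2) ++ xs.filter (fun x => key x == 3) := by
  induction xs using List.reverseRecOn with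
  | nil => simp [PySem.List.sorted_eq_foldl_insertBy]
  | append_singleton xs x ih =>
    have hx := h x (by simp)
    have hxs : ∀ y ∈ xs, 0 ≤ key y ∧ key y ≤ 3 := fun y hy => h y (by simp [hy])
    rw [PySem.List.sorted_eq_foldl_insertBy, List.foldl_append] at *
    simp only [List.foldl_cons, List.foldl_nil]
    rw [ih hxs]
    have hf : ∀ (i : Int) (y : α), y ∈ xs.filter (fun z => key z == i) → key y = i := by
      intro i y hy
      have := List.of_mem_filter hy
      simpa using this
    have hne : (key x = 0 ∨ key x = 1 ∨ key x = 2 ∨ key x = 3) := by omega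
    simp only [List.filter_append, List.filter_cons, List.filter_nil]
    set p := fun a b => decide (key a < key b) with hp
    have hskip : ∀ (i : Int), key x ≥ i → ∀ y ∈ xs.filter (fun z => key z == i), p x y = false := by
      intro i hi y hy
      have := hf i y hy
      simp [hp, this]; omega
    have hbef : ∀ (i : Int), key x < i → ∀ y ∈ xs.filter (fun z => key z == i), p x y = true := by
      intro i hi y hy
      have := hf i y hy
      simp [hp, this]; omega
    rw [List.append_assoc, List.append_assoc]
    rcases hne with h0 | h1 | h2 | h3
    · rw [insertBy_append_skip p x _ _ (hskip 0 (by omega))]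
      rw [insertBy_all_before p x _ (by
        intro y hy
        simp only [List.mem_append] at hy
        rcases hy with hy | hy | hy
        · exact hbef 1 (by omega) y hy
        · exact hbef 2 (by omega) y hy
        · exact hbef 3 (by omega) y hy)]
      simp [h0]
    · rw [insertBy_append_skip p x _ _ (hskip 0 (by omega))]
      rw [insertBy_append_skip p x _ _ (hskip 1 (by omega))]
      rw [insertBy_all_before p x _ (by
        intro y hy
        simp only [List.mem_append] at hy
        rcases hy with hy | hy
        · exact hbef 2 (by omega) y hy
        · exact hbef 3 (by omega) y hy)]
      simp [h1]
    · rw [insertBy_append_skip p x _ _ (hskip 0 (by omega))]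
      rw [insertBy_append_skip p x _ _ (hskip 1 (by omega))]
      rw [insertBy_append_skip p x _ _ (hskip 2 (by omega))]
      rw [insertBy_all_before p x _ (hbef 3 (by omega))]
      simp [h2]
    · rw [insertBy_append_skip p x _ _ (hskip 0 (by omega))]
      rw [insertBy_append_skip p x _ _ (hskip 1 (by omega))]
      rw [insertBy_append_skip p x _ _ (hskip 2 (by omega))]
      rw [PySem.List.insertBy_of_forall_not_before p x _ (hskip 3 (by omega))]
      simp [h3]

theorem rm_key_mk (p t w : String) :
    rm_key (rm_mk p t w) =
      PySem.Dict.getD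
        (PySem.Dict.mk [("Critical", (0 : Int)), ("High", 1), ("Medium", 2), ("Optional", 3)]) p 4 := by
  simp [rm_key, rm_mk, PySem.Dict.getD_eq_get?_getD, PySem.Dict.get?_mk_cons]

theorem rm_key_crit (t w : String) : rm_key (rm_mk "Critical" t w) = 0 := by rw [rm_key_mk]; decide
theorem rm_key_high (t w : String) : rm_key (rm_mk "High" t w) = 1 := by rw [rm_key_mk]; decide
theorem rm_key_med (t w : String) : rm_key (rm_mk "Medium" t w) = 2 := by rw [rm_key_mk]; decide
theorem rm_key_opt (t w : String) : rm_key (rm_mk "Optional" t w) = 3 := by rw [rm_key_mk]; decide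

theorem rm_key_entry (t : String) :
    rm_key (rm_entry t) = 0 ∨ rm_key (rm_entry t) = 1 ∨ rm_key (rm_entry t) = 2 ∨ rm_key (rm_entry t) = 3 := by
  simp only [rm_entry]
  split_ifs <;> simp [rm_key_crit, rm_key_high, rm_key_med, rm_key_opt]

theorem foldl_append_entry (gaps : List String) (acc : List (List (String × String))) :
    gaps.foldl (fun acc topic => acc ++ [rm_entry topic]) acc = acc ++ gaps.map rm_entry := by
  induction gaps generalizing acc with
  | nil => simp
  | cons t ts ih => simp [ih]

theorem alt_fold_spec (gaps : List String)
    (c h m o : List (List (String × String))) :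
    gaps.foldl
      (fun (s : List (List (String × String)) × List (List (String × String)) ×
                List (List (String × String)) × List (List (String × String))) topic =>
        let tl := PySem.Str.lower topic
        if rm_hasAny tl rm_critical_keywords then
          (s.1 ++ [rm_mk "Critical" topic "Core topic essential for your target role."], s.2.1, s.2.2.1, s.2.2.2)
        else if rm_hasAny tl rm_high_keywords then
          (s.1, s.2.1 ++ [rm_mk "High" topic "Important for technical interviews."], s.2.2.1, s.2.2.2)
        else if rm_hasAny tl rm_medium_keywords then
          (s.1, s.2.1, s.2.2.1 ++ [rm_mk "Medium" topic "Would strengthen your profile."], s.2.2.2)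
        else
          (s.1, s.2.1, s.2.2.1, s.2.2.2 ++ [rm_mk "Optional" topic "Good to know for comprehensive preparation."]))
      (c, h, m, o) =
    (c ++ (gaps.map rm_entry).filter (fun r => rm_key r == 0),
     h ++ (gaps.map rm_entry).filter (fun r => rm_key r == 1),
     m ++ (gaps.map rm_entry).filter (fun r => rm_key r == 2),
     o ++ (gaps.map rm_entry).filter (fun r => rm_key r == 3)) := by
  induction gaps generalizing c h m o with
  | nil => simp
  | cons t ts ih =>
    simp only [List.foldl_cons, List.map_cons, List.filter_cons]
    by_cases h1 : rm_hasAny (PySem.Str.lower t) rm_critical_keywords = true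
    · rw [show rm_entry t = rm_mk "Critical" t "Core topic essential for your target role." from by
        simp [rm_entry, h1]]
      simp only [h1, rm_key_crit, ih]
      simp
    · by_cases h2 : rm_hasAny (PySem.Str.lower t) rm_high_keywords = true
      · rw [show rm_entry t = rm_mk "High" t "Important for technical interviews." from by
          simp [rm_entry, h1, h2]]
        simp only [h1, h2, rm_key_high, ih]
        simp
      · by_cases h3 : rm_hasAny (PySem.Str.lower t) rm_medium_keywords = true
        · rw [show rm_entry t = rm_mk "Medium" t "Would strengthen your profile." from by
            simp [rm_entry, h1, h2, h3]]
          simp only [h1, h2, h3, rm_key_med, ih]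
          simp
        · rw [show rm_entry t = rm_mk "Optional" t "Good to know for comprehensive preparation." from by
            simp [rm_entry, h1, h2, h3]]
          simp only [h1, h2, h3, rm_key_opt, ih]
          simp

-- ===== VERDICT (by name: the statement is the Claim_ definition above) =====
theorem build_learning_roadmap_py_spec : Claim_equal_build_learning_roadmap_py := by
  intro gaps _
  unfold Spec_build_learning_roadmap_py build_learning_roadmap_py build_learning_roadmap_py_alt
  rw [foldl_append_entry, alt_fold_spec]
  simp only [List.nil_append]
  rw [sorted_bucket rm_key (gaps.map rm_entry) (by
    intro r hr
    simp only [List.mem_map] at hr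
    obtain ⟨t, _, rfl⟩ := hr
    rcases rm_key_entry t with h | h | h | h <;> omega)]
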